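-- pv_equiv track=rewrite | github.com/prajwal041/ProblemSolving | codility/Microsoft/battleship_board.py | countnumberofships
-- ===== SOURCE A (Python) =====
-- from collections import deque
--
-- def countnumberofships (b):
--     for i in range(len(b)):
--         b[i] = b[i].replace('.', '0').replace('#', '1')
--         b[i] = [int(x) for x in str(b[i])]
--
--     num_rows = len(b)
--     num_cols = len(b[0])
--     res = []
--     def get_neighbour(coord):
--         row, col= coord
--         delta_row = [-1,0,1,0]
--         delta_col = [0,1,0,-1]
--         res= []
--         for i in range(len(delta_row)):
--             row_neighbour = row + delta_row[i]
--             col_neighbour = col + delta_col[i]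
--             if 0 <= row_neighbour < num_rows and 0<= col_neighbour < num_cols:
--                 res.append((row_neighbour, col_neighbour))
--         return res
--     def getsize(start):
--         queue = deque([start])
--         r, c  = start
--         b[r][c] = 0
--         size = 0
--         while len(queue) > 0:
--             node = queue.popleft() #when_we are poping we can increase the size to get the size of an island
--             size += 1
--             for neighbour in get_neighbour(node):
--                 r, c = neighbour
--                 if b[r][c] == 0:
--                     continue
--                 queue.append(neighbour)
--                 b[r][c] = 0
--         return size
--     res = [0] * 3
--     for i in range(num_rows):
--         for j in range(num_cols):
--             if b[i][j] == 0:
--                 continue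
--             size =getsize((i, j))
--             if size <= 3:
--                 res[size -1] += 1
--     return res
-- ===== SOURCE B (Python) =====
-- def countnumberofships(b):
--     for i in range(len(b)):
--         b[i] = [int(x) for x in b[i].replace('.', '0').replace('#', '1')]
--     rows = len(b)
--     cols = len(b[0])
--     res = [0, 0, 0]
--     for i in range(rows):
--         for j in range(cols):
--             if b[i][j] == 0:
--                 continue
--             size = 0
--             stack = [(i, j)]
--             while stack:
--                 r, c = stack.pop()
--                 if 0 <= r < rows and 0 <= c < cols and b[r][c] != 0:
--                     b[r][c] = 0
--                     size += 1
--                     stack.append((r - 1, c))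
--                     stack.append((r + 1, c))
--                     stack.append((r, c - 1))
--                     stack.append((r, c + 1))
--             if size <= 3:
--                 res[size - 1] += 1
--     return res
-- ===== Notes on version B (the rewrite author's own statement) =====
-- stated objective: alternative
-- what changed: Replaces the BFS flood fill (deque, a get_neighbour helper filtering bounds, cells zeroed when enqueued, size counted on dequeue) by an explicit-stack DFS that pushes raw neighbour coordinates and does the bounds/zero check, the zeroing and the counting at pop time.
import Mathlib
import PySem

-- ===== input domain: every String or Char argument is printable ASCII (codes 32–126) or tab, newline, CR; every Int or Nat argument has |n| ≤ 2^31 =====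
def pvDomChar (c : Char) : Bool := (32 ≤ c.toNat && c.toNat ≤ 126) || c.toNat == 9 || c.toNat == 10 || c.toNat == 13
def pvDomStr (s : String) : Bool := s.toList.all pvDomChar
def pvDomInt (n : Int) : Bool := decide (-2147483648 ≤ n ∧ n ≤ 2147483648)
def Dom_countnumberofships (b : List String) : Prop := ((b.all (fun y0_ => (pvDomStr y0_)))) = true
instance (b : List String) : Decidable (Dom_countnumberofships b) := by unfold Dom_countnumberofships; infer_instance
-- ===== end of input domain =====

-- B replaces A's queue-BFS flood fill by an explicit-stack DFS (alternative algorithm, same cost);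
-- the Python A mutates its argument in place and the Python B performs the identical mutation,
-- but the equivalence proved here is about the RETURN value.

-- ===== PORT A =====
-- shared primitives for both ports: one-character parse (int(x) after the two replaces) and 2-d
-- cell read/write. pvCharVal is exact for '.', '#' and digits; Pre_ admits exactly those
-- characters (elsewhere Python raises ValueError). pvGetCell/pvSetCell are only used under
-- 0 ≤ r < rows, 0 ≤ c < cols guards (as in both Pythons), where the .toNat indexing is exact.

def pvCharVal (c : Char) : Int := if c = '.' then 0 else if c = '#' then 1 else ((c.toNat : Int) - 48)
def pvParseRow (s : String) : List Int := s.toList.map pvCharVal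
def pvGetCell (g : List (List Int)) (r c : Int) : Int := (g.getD r.toNat []).getD c.toNat 0
def pvSetCell (g : List (List Int)) (r c v : Int) : List (List Int) :=
  g.set r.toNat ((g.getD r.toNat []).set c.toNat v)
-- ---- semantic layer: bounds, adjacency, reachability, zeroed-region description ----

-- A's get_neighbour: the four deltas in A's order, filtered by the bounds check.

def pvGetNeighbour (numRows numCols r c : Int) : List (Int × Int) :=
  [((-1 : Int), (0 : Int)), (0, 1), (1, 0), (0, -1)].foldl
    (fun acc d =>
      let rn := r + d.1
      let cn := c + d.2
      if 0 ≤ rn ∧ rn < numRows ∧ 0 ≤ cn ∧ cn < numCols then acc ++ [(rn, cn)] else acc) []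

set_option maxHeartbeats 1000000 in

-- A's while-queue loop (deque: popleft = head of the Lean list, append = ++ [·]); fuel only
-- makes the loop total, and the fuel getsize supplies (rows*cols+1) always suffices.

def pvBfs (numRows numCols : Int) : Nat → List (List Int) → List (Int × Int) → Int → List (List Int) × Int
  | 0, g, _, size => (g, size)
  | fuel + 1, g, queue, size =>
    match queue with
    | [] => (g, size)
    | p :: rest =>
      let size := size + 1
      let st := (pvGetNeighbour numRows numCols p.1 p.2).foldl
        (fun (st : List (List Int) × List (Int × Int)) nb =>
          if pvGetCell st.1 nb.1 nb.2 = 0 then st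
          else (pvSetCell st.1 nb.1 nb.2 0, st.2 ++ [nb])) (g, rest)
      pvBfs numRows numCols fuel st.1 st.2 size

def pvGetSize (numRows numCols : Int) (g : List (List Int)) (r c : Int) : List (List Int) × Int :=
  pvBfs numRows numCols ((numRows * numCols).toNat + 1) (pvSetCell g r c 0) [(r, c)] 0

def countnumberofships (b : List String) : List Int :=
  let g0 := b.map pvParseRow
  let numRows : Int := (b.length : Int)
  let numCols : Int := (((g0.headD []).length : Nat) : Int)
  let st := (List.range b.length).foldl
    (fun (st : List (List Int) × List Int) (i : Nat) =>
      (List.range (g0.headD []).length).foldl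
        (fun (st : List (List Int) × List Int) (j : Nat) =>
          if pvGetCell st.1 (i : Int) (j : Int) = 0 then st
          else
            let r := pvGetSize numRows numCols st.1 (i : Int) (j : Int)
            if r.2 ≤ 3 then
              (r.1, st.2.set (r.2 - 1).toNat (st.2.getD (r.2 - 1).toNat 0 + 1))
            else (r.1, st.2)) st) (g0, ([0, 0, 0] : List Int))
  st.2

-- ===== PORT B =====
-- B's while-stack loop; the Lean list holds the Python stack REVERSED (head = top), so Python's
-- pop() is a head match and the four appends become four conses in reverse append order.
-- Fuel only makes the loop total; the supplied fuel (5*rows*cols+2) always suffices.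

def pvFlood (rows cols : Int) : Nat → List (List Int) → List (Int × Int) → Int → List (List Int) × Int
  | 0, g, _, size => (g, size)
  | fuel + 1, g, stack, size =>
    match stack with
    | [] => (g, size)
    | (r, c) :: rest =>
      if 0 ≤ r ∧ r < rows ∧ 0 ≤ c ∧ c < cols ∧ pvGetCell g r c ≠ 0 then
        pvFlood rows cols fuel (pvSetCell g r c 0)
          ((r, c + 1) :: (r, c - 1) :: (r + 1, c) :: (r - 1, c) :: rest) (size + 1)
      else pvFlood rows cols fuel g rest size

def countnumberofships_alt (b : List String) : List Int :=
  let g0 := b.map pvParseRow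
  let rows : Int := (b.length : Int)
  let cols : Int := (((g0.headD []).length : Nat) : Int)
  let st := (List.range b.length).foldl
    (fun (st : List (List Int) × List Int) (i : Nat) =>
      (List.range (g0.headD []).length).foldl
        (fun (st : List (List Int) × List Int) (j : Nat) =>
          if pvGetCell st.1 (i : Int) (j : Int) = 0 then st
          else
            let r := pvFlood rows cols (5 * (rows * cols).toNat + 2) st.1 [((i : Int), (j : Int))] 0
            if r.2 ≤ 3 then
              (r.1, st.2.set (r.2 - 1).toNat (st.2.getD (r.2 - 1).toNat 0 + 1))
            else (r.1, st.2)) st) (g0, ([0, 0, 0] : List Int))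
  st.2

-- ===== PRECONDITION & SPEC =====
-- Pre_ is exactly where the Python A returns: b nonempty (else IndexError at b[0]), every character
-- a '.', '#' or a digit (else int(x) raises ValueError), and no row shorter than row 0 (else the
-- row-major scan hits b[i][j] with j past that row's end: IndexError).
def Pre_countnumberofships (b : List String) : Prop :=
  b ≠ [] ∧
    (b.all (fun s => s.toList.all (fun c => c == '.' || c == '#' || ('0' ≤ c && c ≤ '9')))) = true ∧
    (b.all (fun s => (b.headD "").toList.length ≤ s.toList.length)) = true
instance (b : List String) : Decidable (Pre_countnumberofships b) := by
  unfold Pre_countnumberofships; infer_instance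

def pvWitness_countnumberofships : List String := ["##.", ".#.", "..#"]

def Spec_countnumberofships (b : List String) (out : List Int) : Prop := out = countnumberofships_alt b
instance (b : List String) (out : List Int) : Decidable (Spec_countnumberofships b out) := by
  unfold Spec_countnumberofships; infer_instance

-- ===== CLAIM (what is proved, stated in full; the proofs are below) =====
def Claim_equal_countnumberofships : Prop :=
  ∀ (b : List String), Dom_countnumberofships b → Pre_countnumberofships b →
    Spec_countnumberofships b (countnumberofships b)

-- ===== LEMMAS AND PROOFS =====

-- semantic layer: bounds, adjacency, reachability, "g' is g with exactly Z zeroed"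

def pvInB (R C : Int) (p : Int × Int) : Prop := 0 ≤ p.1 ∧ p.1 < R ∧ 0 ≤ p.2 ∧ p.2 < C

def pvAdj (p q : Int × Int) : Prop :=
  q = (p.1 - 1, p.2) ∨ q = (p.1 + 1, p.2) ∨ q = (p.1, p.2 - 1) ∨ q = (p.1, p.2 + 1)

def pvLive (R C : Int) (g : List (List Int)) (p : Int × Int) : Prop :=
  pvInB R C p ∧ pvGetCell g p.1 p.2 ≠ 0

def pvStepR (R C : Int) (g : List (List Int)) (a b : Int × Int) : Prop :=
  pvAdj a b ∧ pvLive R C g b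

def pvComp (R C : Int) (g : List (List Int)) (s : Int × Int) : Set (Int × Int) :=
  {t | Relation.ReflTransGen (pvStepR R C g) s t}

def pvShape (g : List (List Int)) : List Nat := g.map List.length

-- "g' is g with exactly the cells of Z zeroed" (only nonneg coordinates matter: all accesses are guarded)
def pvZOn (g g' : List (List Int)) (Z : Set (Int × Int)) : Prop :=
  pvShape g' = pvShape g ∧
    ∀ r c : Int, 0 ≤ r → 0 ≤ c →
      ((r, c) ∈ Z → pvGetCell g' r c = 0) ∧ ((r, c) ∉ Z → pvGetCell g' r c = pvGetCell g r c)

def pvAll (R C : Int) : Finset (Int × Int) :=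
  ((Finset.range R.toNat) ×ˢ (Finset.range C.toNat)).image (fun p => ((p.1 : Int), (p.2 : Int)))

def pvLiveSet (R C : Int) (g : List (List Int)) : Finset (Int × Int) :=
  (pvAll R C).filter (fun p => pvGetCell g p.1 p.2 ≠ 0)

def pvOK (R C : Int) (g : List (List Int)) : Prop :=
  g.length = R.toNat ∧ ∀ row ∈ g, C.toNat ≤ row.length

lemma pv_mem_all {R C : Int} {p : Int × Int} : p ∈ pvAll R C ↔ pvInB R C p := by
  unfold pvAll pvInB
  simp only [Finset.mem_image, Finset.mem_product, Finset.mem_range, Prod.exists]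
  constructor
  · rintro ⟨a, b, ⟨ha, hb⟩, rfl⟩; simp; omega
  · rintro ⟨h1, h2, h3, h4⟩
    exact ⟨p.1.toNat, p.2.toNat, ⟨by omega, by omega⟩, by
      rw [Int.toNat_of_nonneg h1, Int.toNat_of_nonneg h3]⟩

lemma pv_mem_liveSet {R C : Int} {g : List (List Int)} {p : Int × Int} :
    p ∈ pvLiveSet R C g ↔ pvLive R C g p := by
  unfold pvLiveSet pvLive
  simp [Finset.mem_filter, pv_mem_all]

lemma pv_zon_refl (g : List (List Int)) : pvZOn g g ∅ := by
  refine ⟨rfl, fun r c _ _ => ⟨fun h => h.elim, fun _ => rfl⟩⟩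

lemma pv_zon_trans {g g' g'' : List (List Int)} {Z Z' : Set (Int × Int)}
    (h1 : pvZOn g g' Z) (h2 : pvZOn g' g'' Z') : pvZOn g g'' (Z ∪ Z') := by
  obtain ⟨s1, c1⟩ := h1; obtain ⟨s2, c2⟩ := h2
  refine ⟨s2.trans s1, fun r c hr hc => ⟨?_, ?_⟩⟩
  · rintro (h | h)
    · by_cases h' : (r, c) ∈ Z'
      · exact ((c2 r c hr hc).1 h')
      · exact ((c2 r c hr hc).2 h').trans ((c1 r c hr hc).1 h)
    · exact (c2 r c hr hc).1 h
  · intro h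
    exact ((c2 r c hr hc).2 (fun m => h (Or.inr m))).trans
      ((c1 r c hr hc).2 (fun m => h (Or.inl m)))
lemma pv_getD_set_self {α : Type} (l : List α) (n : Nat) (v d : α) (h : n < l.length) :
    (l.set n v).getD n d = v := by
  simp [List.getD_eq_getElem?_getD, List.getElem?_set_self h]

lemma pv_getD_set_ne {α : Type} (l : List α) (n m : Nat) (v d : α) (h : n ≠ m) :
    (l.set n v).getD m d = l.getD m d := by
  simp [List.getD_eq_getElem?_getD, List.getElem?_set_ne h]

lemma pv_ok_of_shape {R C : Int} {g g' : List (List Int)}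
    (hs : pvShape g' = pvShape g) (h : pvOK R C g) : pvOK R C g' := by
  obtain ⟨hl, hr⟩ := h
  have hlen : g'.length = g.length := by
    have := congrArg List.length hs; simpa [pvShape] using this
  refine ⟨hlen.trans hl, ?_⟩
  intro row hrow
  obtain ⟨i, hi, rfl⟩ := List.mem_iff_getElem.mp hrow
  have h2 : (pvShape g')[i]'(by simpa [pvShape] using hi) =
      (pvShape g)[i]'(by simp [pvShape]; omega) := by
    congr 1
  simp only [pvShape, List.getElem_map] at h2
  rw [h2]
  exact hr _ (List.getElem_mem _)

lemma pv_zon_set {R C : Int} {g : List (List Int)} {r c : Int}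
    (hOK : pvOK R C g) (hin : pvInB R C (r, c)) :
    pvZOn g (pvSetCell g r c 0) {(r, c)} := by
  obtain ⟨hlen, hrow⟩ := hOK
  obtain ⟨h0r, hrR, h0c, hcC⟩ := hin
  have hrlen : r.toNat < g.length := by omega
  have hclen : c.toNat < (g.getD r.toNat []).length := by
    have := hrow (g.getD r.toNat []) (by
      rw [List.getD_eq_getElem _ _ hrlen]; exact List.getElem_mem _)
    omega
  constructor
  · unfold pvShape pvSetCell
    rw [List.map_set]
    apply List.ext_getElem (by simp)
    intro i hi1 hi2
    by_cases hir : i = r.toNat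
    · subst hir
      simp [List.getElem_set_self, List.getElem?_eq_getElem hrlen]
    · simp [List.getElem_set_ne (by omega : r.toNat ≠ i)]
  · intro r' c' h0r' h0c'
    constructor
    · intro hmem
      rw [Set.mem_singleton_iff, Prod.mk.injEq] at hmem
      obtain ⟨rfl, rfl⟩ := hmem
      unfold pvGetCell pvSetCell
      rw [pv_getD_set_self _ _ _ _ hrlen, pv_getD_set_self _ _ _ _ hclen]
    · intro hmem
      rw [Set.mem_singleton_iff, Prod.mk.injEq] at hmem
      unfold pvGetCell pvSetCell
      by_cases hr' : r' = r
      · subst hr'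
        have hcne : ¬ c' = c := fun e => hmem ⟨rfl, e⟩
        rw [pv_getD_set_self _ _ _ _ hrlen,
          pv_getD_set_ne _ _ _ _ _ (by omega : c.toNat ≠ c'.toNat)]
      · rw [pv_getD_set_ne _ _ _ _ _ (by omega : r.toNat ≠ r'.toNat)]
lemma pv_live_zon_iff {R C : Int} {g g' : List (List Int)} {V : Finset (Int × Int)}
    (h : pvZOn g g' ↑V) {p : Int × Int} :
    pvLive R C g' p ↔ (pvLive R C g p ∧ p ∉ V) := by
  obtain ⟨a, b⟩ := p
  obtain ⟨-, hc⟩ := h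
  constructor
  · rintro ⟨hin, hcell⟩
    have h0a : (0:Int) ≤ a := hin.1
    have h0b : (0:Int) ≤ b := hin.2.2.1
    have hnV : (a, b) ∉ V := by
      intro m
      exact hcell ((hc a b h0a h0b).1 (by exact_mod_cast m))
    refine ⟨⟨hin, ?_⟩, hnV⟩
    rwa [← (hc a b h0a h0b).2 (by exact_mod_cast hnV)]
  · rintro ⟨⟨hin, hcell⟩, hnV⟩
    have h0a : (0:Int) ≤ a := hin.1
    have h0b : (0:Int) ≤ b := hin.2.2.1
    refine ⟨hin, ?_⟩
    rwa [(hc a b h0a h0b).2 (by exact_mod_cast hnV)]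

lemma pv_liveSet_zon {R C : Int} {g g' : List (List Int)} {V : Finset (Int × Int)}
    (h : pvZOn g g' ↑V) : pvLiveSet R C g' = pvLiveSet R C g \ V := by
  ext p
  rw [pv_mem_liveSet, Finset.mem_sdiff, pv_mem_liveSet, pv_live_zon_iff h]

lemma pv_liveSet_card_le {R C : Int} (hR : 0 ≤ R) (hC : 0 ≤ C) (g : List (List Int)) :
    (pvLiveSet R C g).card ≤ (R * C).toNat := by
  have h1 : (pvLiveSet R C g).card ≤ (pvAll R C).card := Finset.card_filter_le _ _
  have h2 : (pvAll R C).card ≤ R.toNat * C.toNat := by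
    refine le_trans (Finset.card_image_le) ?_
    simp [Finset.card_product]
  have h3 : R.toNat * C.toNat = (R * C).toNat := by
    have : ((R.toNat * C.toNat : Nat) : Int) = R * C := by
      push_cast
      rw [Int.toNat_of_nonneg hR, Int.toNat_of_nonneg hC]
    omega
  omega

lemma pv_comp_ext {R C : Int} {g : List (List Int)} {s a b : Int × Int}
    (ha : a ∈ pvComp R C g s) (hab : pvStepR R C g a b) : b ∈ pvComp R C g s :=
  Relation.ReflTransGen.tail ha hab

lemma pv_comp_min {R C : Int} {g : List (List Int)} {s : Int × Int} {S : Set (Int × Int)}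
    (hs : s ∈ S) (hcl : ∀ a ∈ S, ∀ b, pvStepR R C g a b → b ∈ S) :
    pvComp R C g s ⊆ S := by
  intro t ht
  induction ht with
  | refl => exact hs
  | tail h1 h2 ih => exact hcl _ ih _ h2

set_option maxHeartbeats 1000000 in
lemma pv_mem_getNeighbour {R C r c : Int} {q : Int × Int} :
    q ∈ pvGetNeighbour R C r c ↔ pvAdj (r, c) q ∧ pvInB R C q := by
  obtain ⟨qa, qb⟩ := q
  unfold pvGetNeighbour pvAdj pvInB
  simp only [List.foldl_cons, List.foldl_nil, List.nil_append, Prod.mk.injEq]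
  split_ifs with h1 h2 h3 h4 <;>
    simp only [List.mem_append, List.mem_singleton, List.not_mem_nil, List.nil_append,
      Prod.mk.injEq]
  all_goals try omega
  rw [false_iff]
  omega

lemma pv_grid_ext {g1 g2 : List (List Int)} (hs : pvShape g1 = pvShape g2)
    (h : ∀ r c : Int, 0 ≤ r → 0 ≤ c → pvGetCell g1 r c = pvGetCell g2 r c) : g1 = g2 := by
  have hlen : g1.length = g2.length := by
    have := congrArg List.length hs; simpa [pvShape] using this
  apply List.ext_getElem hlen
  intro i hi1 hi2
  have hrow : g1[i].length = g2[i].length := by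
    have h2 : (pvShape g1)[i]'(by simpa [pvShape] using hi1) =
        (pvShape g2)[i]'(by simpa [pvShape] using hi2) := by congr 1
    simpa [pvShape] using h2
  apply List.ext_getElem hrow
  intro j hj1 hj2
  have := h (i : Int) (j : Int) (by positivity) (by positivity)
  unfold pvGetCell at this
  simpa [List.getD_eq_getElem?_getD, List.getElem?_eq_getElem, hi1, hi2, hj1, hj2] using this

lemma pv_bfs_fold {R C : Int} {g0 : List (List Int)} {start p : Int × Int}
    (hOK0 : pvOK R C g0) :
    ∀ (L : List (Int × Int)), (∀ q ∈ L, pvAdj p q ∧ pvInB R C q) →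
    ∀ (g : List (List Int)) (acc : List (Int × Int)) (V : Finset (Int × Int)),
      p ∈ V → (↑V ⊆ pvComp R C g0 start) → (∀ x ∈ V, pvLive R C g0 x) → pvZOn g0 g ↑V →
      ∃ Δ : List (Int × Int), Δ.Nodup ∧
        (∀ d ∈ Δ, d ∉ V ∧ pvLive R C g0 d ∧ d ∈ pvComp R C g0 start) ∧
        (L.foldl (fun (st : List (List Int) × List (Int × Int)) nb =>
          if pvGetCell st.1 nb.1 nb.2 = 0 then st
          else (pvSetCell st.1 nb.1 nb.2 0, st.2 ++ [nb])) (g, acc)).2 = acc ++ Δ ∧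
        pvZOn g0 (L.foldl (fun (st : List (List Int) × List (Int × Int)) nb =>
          if pvGetCell st.1 nb.1 nb.2 = 0 then st
          else (pvSetCell st.1 nb.1 nb.2 0, st.2 ++ [nb])) (g, acc)).1 ↑(V ∪ Δ.toFinset) ∧
        (∀ q ∈ L, pvLive R C g0 q → q ∈ V ∪ Δ.toFinset) := by
  intro L
  induction L with
  | nil =>
    intro _ g acc V hpV hVcomp hVlive hZ
    exact ⟨[], by simp, by simp, by simp, by simpa using hZ, by simp⟩
  | cons q L ih =>
    intro hL g acc V hpV hVcomp hVlive hZ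
    have hq := hL q (List.mem_cons_self ..)
    by_cases hzero : pvGetCell g q.1 q.2 = 0
    · have hcover : pvLive R C g0 q → q ∈ V := by
        intro hlq
        by_contra hqV
        have := (hZ.2 q.1 q.2 hlq.1.1 hlq.1.2.2.1).2 (by
          simpa using (fun m => hqV (by simpa using m)))
        exact hlq.2 (by rw [← this]; exact hzero)
      obtain ⟨Δ, hnd, hmem, hacc, hzon, hcov⟩ :=
        ih (fun x hx => hL x (List.mem_cons_of_mem _ hx)) g acc V hpV hVcomp hVlive hZ
      refine ⟨Δ, hnd, hmem, ?_, ?_, ?_⟩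
      · simpa [List.foldl_cons, hzero] using hacc
      · simpa [List.foldl_cons, hzero] using hzon
      · intro x hx hlx
        rcases List.mem_cons.mp hx with rfl | hx'
        · exact Finset.mem_union_left _ (hcover hlx)
        · exact hcov x hx' hlx
    · -- q is live in g: zero it, append it
      have hliveg : pvLive R C g q := ⟨hq.2, hzero⟩
      have h2 := (pv_live_zon_iff hZ (p := q)).mp hliveg
      have hlive0 : pvLive R C g0 q := h2.1
      have hqV : q ∉ V := h2.2
      have hqcomp : q ∈ pvComp R C g0 start :=
        pv_comp_ext (hVcomp hpV) ⟨hq.1, hlive0⟩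
      have hOKg : pvOK R C g := pv_ok_of_shape hZ.1 hOK0
      have hZ' : pvZOn g0 (pvSetCell g q.1 q.2 0) ↑(V ∪ {q}) := by
        have := pv_zon_trans hZ (pv_zon_set hOKg hq.2)
        simpa using this
      obtain ⟨Δ, hnd, hmem, hacc, hzon, hcov⟩ :=
        ih (fun x hx => hL x (List.mem_cons_of_mem _ hx))
          (pvSetCell g q.1 q.2 0) (acc ++ [q]) (V ∪ {q})
          (Finset.mem_union_left _ hpV)
          (by
            intro x hx
            rcases Finset.mem_coe.mp hx |> Finset.mem_union.mp with h | h
            · exact hVcomp (Finset.mem_coe.mpr h)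
            · rw [Finset.mem_singleton.mp h]; exact hqcomp)
          (by
            intro x hx
            rcases Finset.mem_union.mp hx with h | h
            · exact hVlive x h
            · rw [Finset.mem_singleton.mp h]; exact hlive0)
          hZ'
      refine ⟨q :: Δ, ?_, ?_, ?_, ?_, ?_⟩
      · refine List.nodup_cons.mpr ⟨?_, hnd⟩
        intro hqΔ
        exact (hmem q hqΔ).1 (Finset.mem_union_right _ (Finset.mem_singleton_self q))
      · intro d hd
        rcases List.mem_cons.mp hd with rfl | hd'
        · exact ⟨hqV, hlive0, hqcomp⟩
        · obtain ⟨h1, h2, h3⟩ := hmem d hd'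
          exact ⟨fun m => h1 (Finset.mem_union_left _ m), h2, h3⟩
      · rw [List.foldl_cons]
        simp only [hzero, if_false]
        rw [hacc]
        simp
      · rw [List.foldl_cons]
        simp only [hzero, if_false]
        have : V ∪ {q} ∪ Δ.toFinset = V ∪ (q :: Δ).toFinset := by
          ext x
          simp [Finset.mem_union, Finset.mem_insert]
        rwa [this] at hzon
      · intro x hx hlx
        have huni : V ∪ {q} ∪ Δ.toFinset = V ∪ (q :: Δ).toFinset := by
          ext y
          simp [Finset.mem_union, Finset.mem_insert]
        rcases List.mem_cons.mp hx with rfl | hx'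
        · rw [← huni]
          exact Finset.mem_union_left _ (Finset.mem_union_right _ (Finset.mem_singleton_self x))
        · rw [← huni]
          exact hcov x hx' hlx

lemma pv_closed_comp {R C : Int} {g0 : List (List Int)} {start : Int × Int}
    {V : Finset (Int × Int)} (hstart : start ∈ V) (hVcomp : ↑V ⊆ pvComp R C g0 start)
    (hcl : ∀ x ∈ V, ∀ q, pvStepR R C g0 x q → q ∈ V) : ↑V = pvComp R C g0 start := by
  apply Set.Subset.antisymm hVcomp
  exact pv_comp_min (Finset.mem_coe.mpr hstart)
    (fun a ha b hb => Finset.mem_coe.mpr (hcl a (Finset.mem_coe.mp ha) b hb))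

lemma pv_bfs_spec {R C : Int} {g0 : List (List Int)} {start : Int × Int}
    (hOK0 : pvOK R C g0) :
    ∀ (fuel : Nat) (g : List (List Int)) (Q : List (Int × Int)) (V : Finset (Int × Int)),
      Q.Nodup → (∀ q ∈ Q, q ∈ V) → start ∈ V →
      (↑V ⊆ pvComp R C g0 start) → (∀ x ∈ V, pvLive R C g0 x) →
      pvZOn g0 g ↑V →
      (∀ x ∈ V, x ∉ Q → ∀ q, pvStepR R C g0 x q → q ∈ V) →
      (pvLiveSet R C g).card + Q.length ≤ fuel →
      ∃ W : Finset (Int × Int), ↑W = pvComp R C g0 start ∧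
        (pvBfs R C fuel g Q ((V.card : Int) - Q.length)).2 = (W.card : Int) ∧
        pvZOn g0 (pvBfs R C fuel g Q ((V.card : Int) - Q.length)).1 ↑W := by
  intro fuel
  induction fuel with
  | zero =>
    intro g Q V hnd hQV hstart hVcomp hVlive hZ hcl hfuel
    have hQ : Q = [] := by
      cases Q with
      | nil => rfl
      | cons a t => simp at hfuel
    subst hQ
    have hW : (↑V : Set (Int × Int)) = pvComp R C g0 start :=
      pv_closed_comp hstart hVcomp (fun x hx => hcl x hx (by simp))
    exact ⟨V, hW, by simp [pvBfs], by simpa [pvBfs] using hZ⟩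
  | succ fuel ih =>
    intro g Q V hnd hQV hstart hVcomp hVlive hZ hcl hfuel
    cases Q with
    | nil =>
      have hW : (↑V : Set (Int × Int)) = pvComp R C g0 start :=
        pv_closed_comp hstart hVcomp (fun x hx => hcl x hx (by simp))
      exact ⟨V, hW, by simp [pvBfs], by simpa [pvBfs] using hZ⟩
    | cons p rest =>
      have hpV : p ∈ V := hQV p (List.mem_cons_self ..)
      obtain ⟨Δ, hndΔ, hmemΔ, hacc, hzon, hcov⟩ :=
        pv_bfs_fold hOK0 (pvGetNeighbour R C p.1 p.2)
          (fun q hq => (pv_mem_getNeighbour.mp hq))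
          g rest V hpV hVcomp hVlive hZ
      have hΔV : Disjoint V Δ.toFinset := by
        rw [Finset.disjoint_right]
        intro d hd
        exact (hmemΔ d (List.mem_toFinset.mp hd)).1
      have hcard' : (V ∪ Δ.toFinset).card = V.card + Δ.length := by
        rw [Finset.card_union_of_disjoint hΔV, List.toFinset_card_of_nodup hndΔ]
      -- invariants for the recursive call
      have hnd' : (rest ++ Δ).Nodup := by
        rw [List.nodup_append]
        exact ⟨(List.nodup_cons.mp hnd).2, hndΔ,
          fun a ha b hb => fun e => (hmemΔ b hb).1 (hQV a (List.mem_cons_of_mem _ ha) |> (e ▸ ·))⟩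
      have hQV' : ∀ q ∈ rest ++ Δ, q ∈ V ∪ Δ.toFinset := by
        intro q hq
        rcases List.mem_append.mp hq with h | h
        · exact Finset.mem_union_left _ (hQV q (List.mem_cons_of_mem _ h))
        · exact Finset.mem_union_right _ (List.mem_toFinset.mpr h)
      have hstart' : start ∈ V ∪ Δ.toFinset := Finset.mem_union_left _ hstart
      have hVcomp' : (↑(V ∪ Δ.toFinset) : Set (Int × Int)) ⊆ pvComp R C g0 start := by
        intro x hx
        rcases Finset.mem_union.mp (Finset.mem_coe.mp hx) with h | h
        · exact hVcomp (Finset.mem_coe.mpr h)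
        · exact (hmemΔ x (List.mem_toFinset.mp h)).2.2
      have hVlive' : ∀ x ∈ V ∪ Δ.toFinset, pvLive R C g0 x := by
        intro x hx
        rcases Finset.mem_union.mp hx with h | h
        · exact hVlive x h
        · exact (hmemΔ x (List.mem_toFinset.mp h)).2.1
      have hcl' : ∀ x ∈ V ∪ Δ.toFinset, x ∉ rest ++ Δ →
          ∀ q, pvStepR R C g0 x q → q ∈ V ∪ Δ.toFinset := by
        intro x hx hxQ q hq
        rcases Finset.mem_union.mp hx with h | h
        · by_cases hxp : x = p
          · subst hxp
            exact hcov q (pv_mem_getNeighbour.mpr ⟨hq.1, hq.2.1⟩) hq.2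
          · have hxrest : x ∉ rest := fun m => hxQ (List.mem_append.mpr (Or.inl m))
            have : x ∉ p :: rest := by
              intro m
              rcases List.mem_cons.mp m with h' | h'
              · exact hxp h'
              · exact hxrest h'
            exact Finset.mem_union_left _ (hcl x h this q hq)
        · exact absurd (List.mem_append.mpr (Or.inr (List.mem_toFinset.mp h))) hxQ
      -- fuel bound
      have hVsub : V ⊆ pvLiveSet R C g0 := fun x hx => pv_mem_liveSet.mpr (hVlive x hx)
      have hVsub' : V ∪ Δ.toFinset ⊆ pvLiveSet R C g0 :=
        fun x hx => pv_mem_liveSet.mpr (hVlive' x hx)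
      have hlg : pvLiveSet R C g = pvLiveSet R C g0 \ V := pv_liveSet_zon hZ
      have hlg' := pv_liveSet_zon (R := R) (C := C) hzon
      have hfuel' : (pvLiveSet R C ((pvGetNeighbour R C p.1 p.2).foldl
            (fun (st : List (List Int) × List (Int × Int)) nb =>
              if pvGetCell st.1 nb.1 nb.2 = 0 then st
              else (pvSetCell st.1 nb.1 nb.2 0, st.2 ++ [nb])) (g, rest)).1).card
            + (rest ++ Δ).length ≤ fuel := by
        rw [hlg', Finset.card_sdiff, Finset.inter_eq_left.mpr hVsub']
        rw [hlg, Finset.card_sdiff, Finset.inter_eq_left.mpr hVsub] at hfuel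
        have h1 := Finset.card_le_card hVsub
        have h2 := Finset.card_le_card hVsub'
        simp only [List.length_cons, List.length_append] at hfuel ⊢
        omega
      obtain ⟨W, hW1, hW2, hW3⟩ := ih _ (rest ++ Δ) (V ∪ Δ.toFinset)
        hnd' hQV' hstart' hVcomp' hVlive' hzon hcl' hfuel'
      have hred : pvBfs R C (fuel + 1) g (p :: rest) ((V.card : Int) - ((p :: rest).length : Int)) =
          pvBfs R C fuel ((pvGetNeighbour R C p.1 p.2).foldl
            (fun (st : List (List Int) × List (Int × Int)) nb =>
              if pvGetCell st.1 nb.1 nb.2 = 0 then st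
              else (pvSetCell st.1 nb.1 nb.2 0, st.2 ++ [nb])) (g, rest)).1
            (rest ++ Δ) (((V ∪ Δ.toFinset).card : Int) - ((rest ++ Δ).length : Int)) := by
        have hsz : ((V.card : Int) - ((p :: rest).length : Int)) + 1 =
            ((V ∪ Δ.toFinset).card : Int) - ((rest ++ Δ).length : Int) := by
          rw [hcard']
          simp only [List.length_cons, List.length_append]
          push_cast
          ring
        rw [pvBfs, hsz, ← hacc]
      exact ⟨W, hW1, by rw [hred]; exact hW2, by rw [hred]; exact hW3⟩

lemma pv_flood_spec {R C : Int} {g0 : List (List Int)} {start : Int × Int}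
    (hOK0 : pvOK R C g0) (hs0 : pvLive R C g0 start) :
    ∀ (fuel : Nat) (g : List (List Int)) (S : List (Int × Int)) (V : Finset (Int × Int)),
      ((V = ∅ ∧ S = [start]) ∨ start ∈ V) →
      (∀ q ∈ S, q = start ∨ ∃ v ∈ V, pvAdj v q) →
      (↑V ⊆ pvComp R C g0 start) → (∀ x ∈ V, pvLive R C g0 x) →
      pvZOn g0 g ↑V →
      (∀ x ∈ V, ∀ q, pvStepR R C g0 x q → q ∈ V ∨ q ∈ S) →
      5 * (pvLiveSet R C g).card + S.length ≤ fuel →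
      ∃ W : Finset (Int × Int), ↑W = pvComp R C g0 start ∧
        (pvFlood R C fuel g S (V.card : Int)).2 = (W.card : Int) ∧
        pvZOn g0 (pvFlood R C fuel g S (V.card : Int)).1 ↑W := by
  intro fuel
  induction fuel with
  | zero =>
    intro g S V hinit hped hVcomp hVlive hZ hcl hfuel
    have hS : S = [] := by
      cases S with
      | nil => rfl
      | cons a t => simp at hfuel
    subst hS
    have hstart : start ∈ V := by
      rcases hinit with ⟨-, h⟩ | h
      · exact absurd h (by simp)
      · exact h
    have hW : (↑V : Set (Int × Int)) = pvComp R C g0 start :=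
      pv_closed_comp hstart hVcomp
        (fun x hx q hq => (hcl x hx q hq).resolve_right (by simp))
    exact ⟨V, hW, by simp [pvFlood], by simpa [pvFlood] using hZ⟩
  | succ fuel ih =>
    intro g S V hinit hped hVcomp hVlive hZ hcl hfuel
    cases S with
    | nil =>
      have hstart : start ∈ V := by
        rcases hinit with ⟨-, h⟩ | h
        · exact absurd h (by simp)
        · exact h
      have hW : (↑V : Set (Int × Int)) = pvComp R C g0 start :=
        pv_closed_comp hstart hVcomp
          (fun x hx q hq => (hcl x hx q hq).resolve_right (by simp))
      exact ⟨V, hW, by simp [pvFlood], by simpa [pvFlood] using hZ⟩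
    | cons p rest =>
      obtain ⟨r, c⟩ := p
      by_cases hb : 0 ≤ r ∧ r < R ∧ 0 ≤ c ∧ c < C ∧ pvGetCell g r c ≠ 0
      · -- live pop: zero it, count it, push the four raw neighbours
        have hliveg : pvLive R C g (r, c) := ⟨⟨hb.1, hb.2.1, hb.2.2.1, hb.2.2.2.1⟩, hb.2.2.2.2⟩
        have h2 := (pv_live_zon_iff hZ (p := (r, c))).mp hliveg
        have hlive0 : pvLive R C g0 (r, c) := h2.1
        have hpV : (r, c) ∉ V := h2.2
        have hpcomp : (r, c) ∈ pvComp R C g0 start := by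
          rcases hped (r, c) (List.mem_cons_self ..) with h | ⟨v, hv, hadj⟩
          · rw [h]; exact Relation.ReflTransGen.refl
          · exact pv_comp_ext (hVcomp hv) ⟨hadj, hlive0⟩
        have hOKg : pvOK R C g := pv_ok_of_shape hZ.1 hOK0
        have hZ' : pvZOn g0 (pvSetCell g r c 0) ↑(insert (r, c) V) := by
          have := pv_zon_trans hZ (pv_zon_set hOKg hlive0.1)
          have he : (↑V ∪ {(r, c)} : Set (Int × Int)) = ↑(insert (r, c) V) := by
            simp
          rwa [he] at this
        have hstart' : start ∈ insert (r, c) V := by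
          rcases hinit with ⟨hV, hSs⟩ | h
          · rw [← (List.cons_eq_cons.mp hSs).1]; exact Finset.mem_insert_self _ _
          · exact Finset.mem_insert_of_mem h
        have hVcomp' : (↑(insert (r, c) V) : Set (Int × Int)) ⊆ pvComp R C g0 start := by
          intro x hx
          rcases Finset.mem_insert.mp (Finset.mem_coe.mp hx) with h | h
          · rw [h]; exact hpcomp
          · exact hVcomp (Finset.mem_coe.mpr h)
        have hVlive' : ∀ x ∈ insert (r, c) V, pvLive R C g0 x := by
          intro x hx
          rcases Finset.mem_insert.mp hx with h | h
          · rw [h]; exact hlive0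
          · exact hVlive x h
        have hped' : ∀ q ∈ ((r, c + 1) :: (r, c - 1) :: (r + 1, c) :: (r - 1, c) :: rest),
            q = start ∨ ∃ v ∈ insert (r, c) V, pvAdj v q := by
          intro q hq
          rcases List.mem_cons.mp hq with rfl | hq
          · exact Or.inr ⟨(r, c), Finset.mem_insert_self _ _, Or.inr (Or.inr (Or.inr rfl))⟩
          rcases List.mem_cons.mp hq with rfl | hq
          · exact Or.inr ⟨(r, c), Finset.mem_insert_self _ _, Or.inr (Or.inr (Or.inl rfl))⟩
          rcases List.mem_cons.mp hq with rfl | hq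
          · exact Or.inr ⟨(r, c), Finset.mem_insert_self _ _, Or.inr (Or.inl rfl)⟩
          rcases List.mem_cons.mp hq with rfl | hq
          · exact Or.inr ⟨(r, c), Finset.mem_insert_self _ _, Or.inl rfl⟩
          rcases hped q (List.mem_cons_of_mem _ hq) with h | ⟨v, hv, hadj⟩
          · exact Or.inl h
          · exact Or.inr ⟨v, Finset.mem_insert_of_mem hv, hadj⟩
        have hcl' : ∀ x ∈ insert (r, c) V, ∀ q, pvStepR R C g0 x q →
            q ∈ insert (r, c) V ∨ q ∈ ((r, c + 1) :: (r, c - 1) :: (r + 1, c) :: (r - 1, c) :: rest) := by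
          intro x hx q hq
          rcases Finset.mem_insert.mp hx with h | h
          · subst h
            rcases hq.1 with h' | h' | h' | h' <;> rw [h'] <;> simp
          · rcases hcl x h q hq with h' | h'
            · exact Or.inl (Finset.mem_insert_of_mem h')
            · rcases List.mem_cons.mp h' with h'' | h''
              · exact Or.inl (h'' ▸ Finset.mem_insert_self _ _)
              · exact Or.inr (by simp [h''])
        have hcard' : (insert (r, c) V).card = V.card + 1 := Finset.card_insert_of_notMem hpV
        have hfuel' : 5 * (pvLiveSet R C (pvSetCell g r c 0)).card +
            ((r, c + 1) :: (r, c - 1) :: (r + 1, c) :: (r - 1, c) :: rest).length ≤ fuel := by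
          have hlg' : pvLiveSet R C (pvSetCell g r c 0) = pvLiveSet R C g \ {(r, c)} := by
            have := pv_liveSet_zon (R := R) (C := C) (V := ({(r, c)} : Finset (Int × Int)))
              (by simpa using pv_zon_set hOKg hlive0.1)
            simpa using this
          have hmemL : (r, c) ∈ pvLiveSet R C g := pv_mem_liveSet.mpr hliveg
          rw [hlg']
          have : (pvLiveSet R C g \ {(r, c)}).card = (pvLiveSet R C g).card - 1 := by
            rw [Finset.sdiff_singleton_eq_erase, Finset.card_erase_of_mem hmemL]
          rw [this]
          have hge : 1 ≤ (pvLiveSet R C g).card := Finset.card_pos.mpr ⟨_, hmemL⟩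
          simp only [List.length_cons] at hfuel ⊢
          omega
        obtain ⟨W, hW1, hW2, hW3⟩ := ih (pvSetCell g r c 0)
          ((r, c + 1) :: (r, c - 1) :: (r + 1, c) :: (r - 1, c) :: rest)
          (insert (r, c) V) (Or.inr hstart') hped' hVcomp' hVlive' hZ' hcl' hfuel'
        have hred : pvFlood R C (fuel + 1) g ((r, c) :: rest) (V.card : Int) =
            pvFlood R C fuel (pvSetCell g r c 0)
              ((r, c + 1) :: (r, c - 1) :: (r + 1, c) :: (r - 1, c) :: rest)
              ((insert (r, c) V).card : Int) := by
          rw [pvFlood, if_pos hb, hcard']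
          norm_cast
        exact ⟨W, hW1, by rw [hred]; exact hW2, by rw [hred]; exact hW3⟩
      · -- dead pop: discard
        have hstart' : start ∈ V := by
          rcases hinit with ⟨hV, hSs⟩ | h
          · exfalso
            have hps : (r, c) = start := (List.cons_eq_cons.mp hSs).1
            have hls : pvLive R C g0 (r, c) := by rw [hps]; exact hs0
            subst hV
            have hceq : pvGetCell g r c = pvGetCell g0 r c :=
              (hZ.2 r c hls.1.1 hls.1.2.2.1).2 (by simp)
            exact hb ⟨hls.1.1, hls.1.2.1, hls.1.2.2.1, hls.1.2.2.2, by
              rw [hceq]; exact hls.2⟩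
          · exact h
        have hcl' : ∀ x ∈ V, ∀ q, pvStepR R C g0 x q → q ∈ V ∨ q ∈ rest := by
          intro x hx q hq
          rcases hcl x hx q hq with h | h
          · exact Or.inl h
          · rcases List.mem_cons.mp h with h' | h'
            · -- q is the discarded top: it must already be zeroed, hence in V
              left
              by_contra hqV
              apply hb
              have hlq : pvLive R C g0 (r, c) := h' ▸ hq.2
              have hceq : pvGetCell g r c = pvGetCell g0 r c :=
                (hZ.2 r c hlq.1.1 hlq.1.2.2.1).2 (fun m => hqV (by
                  rw [h']; exact_mod_cast m))
              exact ⟨hlq.1.1, hlq.1.2.1, hlq.1.2.2.1, hlq.1.2.2.2, by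
                rw [hceq]; exact hlq.2⟩
            · exact Or.inr h'
        have hped' : ∀ q ∈ rest, q = start ∨ ∃ v ∈ V, pvAdj v q :=
          fun q hq => hped q (List.mem_cons_of_mem _ hq)
        have hfuel' : 5 * (pvLiveSet R C g).card + rest.length ≤ fuel := by
          simp only [List.length_cons] at hfuel
          omega
        obtain ⟨W, hW1, hW2, hW3⟩ := ih g rest V (Or.inr hstart') hped' hVcomp hVlive hZ hcl' hfuel'
        have hred : pvFlood R C (fuel + 1) g ((r, c) :: rest) (V.card : Int) =
            pvFlood R C fuel g rest (V.card : Int) := by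
          rw [pvFlood]
          simp only [if_neg hb]
        exact ⟨W, hW1, by rw [hred]; exact hW2, by rw [hred]; exact hW3⟩

lemma pv_call_eq {R C : Int} (hR : 0 ≤ R) (hC : 0 ≤ C) {g : List (List Int)} {i j : Int}
    (hOK : pvOK R C g) (hlive : pvLive R C g (i, j)) :
    pvGetSize R C g i j = pvFlood R C (5 * (R * C).toNat + 2) g [(i, j)] 0 ∧
      pvShape (pvGetSize R C g i j).1 = pvShape g := by
  have hzon1 : pvZOn g (pvSetCell g i j 0) ↑({(i, j)} : Finset (Int × Int)) := by
    simpa using pv_zon_set hOK hlive.1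
  have hcard := pv_liveSet_card_le (R := R) (C := C) hR hC g
  have hfuelA : (pvLiveSet R C (pvSetCell g i j 0)).card
      + ([((i : Int), (j : Int))] : List (Int × Int)).length ≤ (R * C).toNat + 1 := by
    rw [pv_liveSet_zon hzon1]
    have h3 : (pvLiveSet R C g \ {(i, j)}).card ≤ (pvLiveSet R C g).card :=
      Finset.card_le_card Finset.sdiff_subset
    simp only [List.length_cons, List.length_nil]
    omega
  obtain ⟨WA, hWA, hA2, hA3⟩ := pv_bfs_spec (start := (i, j)) hOK ((R * C).toNat + 1)
    (pvSetCell g i j 0) [(i, j)] {(i, j)}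
    (by simp) (by simp) (by simp)
    (by
      intro x hx
      have : x = (i, j) := by simpa using hx
      rw [this]
      exact Relation.ReflTransGen.refl)
    (by
      intro x hx
      rw [Finset.mem_singleton.mp hx]
      exact hlive)
    hzon1
    (by
      intro x hx hxQ
      exact absurd (by rw [Finset.mem_singleton.mp hx]; simp) hxQ)
    hfuelA
  have e1 : ((({((i : Int), (j : Int))} : Finset (Int × Int)).card : Int)
      - (([((i : Int), (j : Int))] : List (Int × Int)).length : Int)) = 0 := by simp
  rw [e1] at hA2 hA3
  -- DFS side
  obtain ⟨WB, hWB, hB2, hB3⟩ := pv_flood_spec (start := (i, j)) hOK hlive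
    (5 * (R * C).toNat + 2) g [(i, j)] ∅
    (Or.inl ⟨rfl, rfl⟩)
    (by
      intro q hq
      exact Or.inl (by simpa using hq))
    (by simp)
    (by simp)
    (by rw [Finset.coe_empty]; exact pv_zon_refl g)
    (by simp)
    (by
      simp only [List.length_cons, List.length_nil]
      omega)
  have e2 : (((∅ : Finset (Int × Int)).card : Int)) = 0 := by simp
  rw [e2] at hB2 hB3
  have hWeq : WA = WB := Finset.coe_injective (hWA.trans hWB.symm)
  subst hWeq
  have hGS : pvGetSize R C g i j = pvBfs R C ((R * C).toNat + 1) (pvSetCell g i j 0) [(i, j)] 0 := rfl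
  rw [hGS]
  have hgrids : (pvBfs R C ((R * C).toNat + 1) (pvSetCell g i j 0) [(i, j)] 0).1 =
      (pvFlood R C (5 * (R * C).toNat + 2) g [(i, j)] 0).1 := by
    apply pv_grid_ext (hA3.1.trans hB3.1.symm)
    intro r c h0r h0c
    by_cases hm : (r, c) ∈ (↑WA : Set (Int × Int))
    · rw [(hA3.2 r c h0r h0c).1 hm, (hB3.2 r c h0r h0c).1 hm]
    · rw [(hA3.2 r c h0r h0c).2 hm, (hB3.2 r c h0r h0c).2 hm]
  constructor
  · exact Prod.ext hgrids (hA2.trans hB2.symm)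
  · exact hA3.1

lemma pv_foldl_eq_inv {α σ : Type*} (P : σ → Prop) (f f' : σ → α → σ) (l : List α) (s : σ)
    (hP : P s) (h : ∀ s a, a ∈ l → P s → f s a = f' s a ∧ P (f s a)) :
    l.foldl f s = l.foldl f' s ∧ P (l.foldl f s) := by
  induction l generalizing s with
  | nil => exact ⟨rfl, hP⟩
  | cons a l ih =>
    obtain ⟨he, hPa⟩ := h s a (by simp) hP
    obtain ⟨he', hP'⟩ := ih (f s a) hPa (fun s a ha hs => h s a (by simp [ha]) hs)
    exact ⟨by rw [List.foldl_cons, List.foldl_cons, ← he, he'], hP'⟩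

theorem countnumberofships_eq (b : List String) (hpre : Pre_countnumberofships b) :
    countnumberofships b = countnumberofships_alt b := by
  obtain ⟨hne, -, hlens'⟩ := hpre
  have hlens : ∀ s ∈ b, (b.headD "").toList.length ≤ s.toList.length := fun s hs => by
    simpa using List.all_eq_true.mp hlens' s hs
  obtain ⟨s0, bs, rfl⟩ := List.exists_cons_of_ne_nil hne
  set b := s0 :: bs with hb
  set g0 := b.map pvParseRow with hg0
  set R : Int := (b.length : Int) with hRdef
  set nC : Nat := (g0.headD []).length with hnC
  set C : Int := (nC : Int) with hCdef
  have hR : (0 : Int) ≤ R := by positivity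
  have hC : (0 : Int) ≤ C := by positivity
  have hOK0 : pvOK R C g0 := by
    constructor
    · simp [hg0, hRdef]
    · intro row hrow
      rw [hg0] at hrow
      obtain ⟨s, hs, rfl⟩ := List.mem_map.mp hrow
      have h1 : nC = s0.toList.length := by
        simp [hnC, hg0, hb, pvParseRow]
      have h2 := hlens s hs
      simp only [hb, List.headD_cons] at h2
      have h3 : (pvParseRow s).length = s.toList.length := by simp [pvParseRow]
      have h4 : C.toNat = nC := by simp [hCdef]
      omega
  -- the per-cell steps agree and preserve well-formedness
  have hstep : ∀ (i : Nat), i ∈ List.range b.length →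
      ∀ (st : List (List Int) × List Int) (j : Nat), j ∈ List.range nC →
      pvOK R C st.1 →
      ((if pvGetCell st.1 (i : Int) (j : Int) = 0 then st
        else
          let r := pvGetSize R C st.1 (i : Int) (j : Int)
          if r.2 ≤ 3 then
            (r.1, st.2.set (r.2 - 1).toNat (st.2.getD (r.2 - 1).toNat 0 + 1))
          else (r.1, st.2)) =
       (if pvGetCell st.1 (i : Int) (j : Int) = 0 then st
        else
          let r := pvFlood R C (5 * (R * C).toNat + 2) st.1 [((i : Int), (j : Int))] 0
          if r.2 ≤ 3 then
            (r.1, st.2.set (r.2 - 1).toNat (st.2.getD (r.2 - 1).toNat 0 + 1))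
          else (r.1, st.2))) ∧
      pvOK R C (if pvGetCell st.1 (i : Int) (j : Int) = 0 then st
        else
          let r := pvGetSize R C st.1 (i : Int) (j : Int)
          if r.2 ≤ 3 then
            (r.1, st.2.set (r.2 - 1).toNat (st.2.getD (r.2 - 1).toNat 0 + 1))
          else (r.1, st.2)).1 := by
    intro i hi st j hj hP
    by_cases h0 : pvGetCell st.1 (i : Int) (j : Int) = 0
    · simp only [if_pos h0]
      exact ⟨by trivial, hP⟩
    · have hlive : pvLive R C st.1 ((i : Int), (j : Int)) := by
        refine ⟨⟨by positivity, ?_, by positivity, ?_⟩, h0⟩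
        · show ((i : Nat) : Int) < R
          rw [hRdef]
          exact_mod_cast List.mem_range.mp hi
        · show ((j : Nat) : Int) < C
          rw [hCdef]
          exact_mod_cast List.mem_range.mp hj
      obtain ⟨heq, hshape⟩ := pv_call_eq hR hC hP hlive
      constructor
      · simp only [h0, if_false]
        rw [heq]
      · simp only [h0, if_false]
        have hPr : pvOK R C (pvGetSize R C st.1 (i : Int) (j : Int)).1 :=
          pv_ok_of_shape hshape hP
        by_cases h3 : (pvGetSize R C st.1 (i : Int) (j : Int)).2 ≤ 3 <;>
          simp only [h3, if_true, if_false] <;> exact hPr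
  have houter := pv_foldl_eq_inv (fun st : List (List Int) × List Int => pvOK R C st.1)
    (fun (st : List (List Int) × List Int) (i : Nat) => (List.range nC).foldl
      (fun (st : List (List Int) × List Int) (j : Nat) =>
        if pvGetCell st.1 (i : Int) (j : Int) = 0 then st
        else
          let r := pvGetSize R C st.1 (i : Int) (j : Int)
          if r.2 ≤ 3 then
            (r.1, st.2.set (r.2 - 1).toNat (st.2.getD (r.2 - 1).toNat 0 + 1))
          else (r.1, st.2)) st)
    (fun (st : List (List Int) × List Int) (i : Nat) => (List.range nC).foldl
      (fun (st : List (List Int) × List Int) (j : Nat) =>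
        if pvGetCell st.1 (i : Int) (j : Int) = 0 then st
        else
          let r := pvFlood R C (5 * (R * C).toNat + 2) st.1 [((i : Int), (j : Int))] 0
          if r.2 ≤ 3 then
            (r.1, st.2.set (r.2 - 1).toNat (st.2.getD (r.2 - 1).toNat 0 + 1))
          else (r.1, st.2)) st)
    (List.range b.length) (g0, ([0, 0, 0] : List Int)) hOK0
    (by
      intro st i hi hP
      exact pv_foldl_eq_inv _ _ _ (List.range nC) st hP
        (fun st j hj hP => hstep i hi st j hj hP))
  show (countnumberofships b) = (countnumberofships_alt b)
  unfold countnumberofships countnumberofships_alt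
  exact congrArg Prod.snd houter.1


-- ===== VERDICT (by name: the statement is the Claim_ definition above) =====
theorem countnumberofships_spec : Claim_equal_countnumberofships := by
  intro b _ hpre
  exact countnumberofships_eq b hpre
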